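-- pv_equiv track=rewrite | github.com/korkeep/Webtoon | extract-hashtag/rank_added.py | check_ahead
-- ===== SOURCE A (Python) =====
-- def check_ahead(a, b):
--     # 두번째 파라미터 : result list의 크기만큼 반복
--     for i in range (0, len(b)):
--         # 3. 현재 인덱스의 스트링의 마지막 엘리먼트에서 0, -1한 값을 비교한다
--         if a==b[i][:len(b[i])-3]: # 한글이어서 3번 빼줘야 함, 인코딩 형식
--             return False
--         elif a[:len(a)-3]==b[i]: # 한글이어서 3번 빼줘야 함, 인코딩 형식
--             return False
--         elif a[:len(a)-3]==b[i][:len(b[i])-3]: # 한글이어서 3번 빼줘야 함, 인코딩 형식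
--             return False
--     return True
-- ===== SOURCE B (Python) =====
-- def check_ahead(a, b):
--     # Equivalent reformulation: a collides with x iff the 3-trimmed "forms"
--     # {a, a[:-3-trim]} and {x, x-trim} intersect (a==x itself implies
--     # trim(a)==trim(x), so the full==full case adds nothing).
--     # Sort both form lists once, then a two-pointer merge detects intersection.
--     u = sorted({a, a[:len(a) - 3]})
--     v = sorted({y for x in b for y in (x, x[:len(x) - 3])})
--     i = j = 0
--     while i < len(u) and j < len(v):
--         if u[i] == v[j]:
--             return False
--         if u[i] < v[j]:
--             i += 1
--         else:
--             j += 1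
--     return True
-- ===== Notes on version B (the rewrite author's own statement) =====
-- stated objective: alternative
-- what changed: Replaces A's per-element scan with three comparisons each by collecting the 3-trimmed 'forms' of a and of all of b, sorting them once, and detecting intersection with a two-pointer merge (valid since a==x already implies trim(a)==trim(x)); a is trimmed once instead of being re-sliced and re-compared on every iteration.
import Mathlib
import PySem

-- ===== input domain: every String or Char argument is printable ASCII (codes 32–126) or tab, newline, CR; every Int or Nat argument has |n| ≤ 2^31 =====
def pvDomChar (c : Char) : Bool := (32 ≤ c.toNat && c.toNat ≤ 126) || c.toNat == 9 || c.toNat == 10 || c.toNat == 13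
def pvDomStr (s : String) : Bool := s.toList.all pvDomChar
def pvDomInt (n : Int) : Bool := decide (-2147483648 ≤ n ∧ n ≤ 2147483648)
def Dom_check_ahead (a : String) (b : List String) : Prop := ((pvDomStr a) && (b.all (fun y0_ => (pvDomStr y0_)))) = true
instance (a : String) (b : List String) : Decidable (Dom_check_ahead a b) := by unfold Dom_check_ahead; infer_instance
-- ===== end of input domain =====

-- B is an alternative algorithm: collect the 3-trimmed 'forms' of a and of all of b, sort them, and detect a collision by a two-pointer merge.

-- ===== PORT A =====
-- s[:len(s)-3], shared literally by both Pythons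
def pvTrim (s : String) : String :=
  String.mk (PySem.List.slice s.toList none (some ((s.toList.length : Int) - 3)))

def check_ahead (a : String) (b : List String) : Bool :=
  match b with
  | [] => true
  | x :: rest =>
    if a == pvTrim x then false
    else if pvTrim a == x then false
    else if pvTrim a == pvTrim x then false
    else check_ahead a rest

-- ===== PORT B =====
-- the while-loop two-pointer merge of Source B, on the list suffixes u[i:], v[j:]
def pvMergeDisjoint : List String → List String → Bool
  | [], _ => true
  | _ :: _, [] => true
  | x :: xs, y :: ys =>
    if x == y then false
    else if x < y then pvMergeDisjoint xs (y :: ys)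
    else pvMergeDisjoint (x :: xs) ys

def check_ahead_alt (a : String) (b : List String) : Bool :=
  let u := PySem.List.sorted (PySem.Set.ofList [a, pvTrim a]) (fun s => s) false
  let v := PySem.List.sorted (PySem.Set.ofList (b.flatMap (fun x => [x, pvTrim x]))) (fun s => s) false
  pvMergeDisjoint u v

-- ===== PRECONDITION & SPEC =====
def Spec_check_ahead (a : String) (b : List String) (out : Bool) : Prop := out = check_ahead_alt a b
instance (a : String) (b : List String) (out : Bool) : Decidable (Spec_check_ahead a b out) := by unfold Spec_check_ahead; infer_instance

-- ===== CLAIM (what is proved, stated in full; the proofs are below) =====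
def Claim_equal_check_ahead : Prop := ∀ (a : String) (b : List String), Dom_check_ahead a b → Spec_check_ahead a b (check_ahead a b)

-- ===== LEMMAS AND PROOFS =====
theorem check_ahead_eq_true_iff (a : String) (b : List String) :
    check_ahead a b = true ↔ ∀ x ∈ b, a ≠ pvTrim x ∧ pvTrim a ≠ x ∧ pvTrim a ≠ pvTrim x := by
  induction b with
  | nil => simp [check_ahead]
  | cons x rest ih =>
    simp only [check_ahead]
    by_cases h1 : a = pvTrim x <;> by_cases h2 : pvTrim a = x <;>
      by_cases h3 : pvTrim a = pvTrim x <;>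
      simp [h1, h2, h3, ih]

theorem pvMergeDisjoint_iff (u v : List String)
    (hu : u.Pairwise (· < ·)) (hv : v.Pairwise (· < ·)) :
    pvMergeDisjoint u v = true ↔ ∀ z ∈ u, z ∉ v := by
  fun_induction pvMergeDisjoint u v with
  | case1 v => simp
  | case2 x xs => simp
  | case3 x xs y ys heq =>
    rw [beq_iff_eq] at heq
    subst heq
    simp
  | case4 x xs y ys heq hlt ih =>
    rw [beq_iff_eq] at heq
    rw [List.pairwise_cons] at hv
    have hxv : x ∉ y :: ys := by
      intro hm
      rcases List.mem_cons.1 hm with rfl | hm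
      · exact heq rfl
      · exact absurd (lt_trans hlt (hv.1 _ hm)) (lt_irrefl x)
    rw [ih (List.pairwise_cons.1 hu).2 (List.pairwise_cons.2 hv)]
    constructor
    · intro h z hz
      rcases List.mem_cons.1 hz with rfl | hz
      · exact hxv
      · exact h z hz
    · intro h z hz; exact h z (List.mem_cons_of_mem _ hz)
  | case5 x xs y ys heq hlt ih =>
    rw [beq_iff_eq] at heq
    have hyx : y < x := lt_of_le_of_ne (not_lt.1 hlt) (Ne.symm heq)
    rw [List.pairwise_cons] at hu
    rw [ih (List.pairwise_cons.2 ⟨hu.1, hu.2⟩ : (x :: xs).Pairwise (· < ·) ) (List.pairwise_cons.1 hv).2]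
    constructor
    · intro h z hz hm
      rcases List.mem_cons.1 hm with hzy | hm
      · rcases List.mem_cons.1 hz with hzx | hz
        · exact absurd (hzy ▸ hzx ▸ hyx) (lt_irrefl _)
        · exact absurd (lt_trans hyx (hzy ▸ hu.1 _ hz)) (lt_irrefl _)
      · exact h z hz hm
    · intro h z hz hm; exact h z hz (List.mem_cons_of_mem _ hm)

theorem check_ahead_alt_eq_true_iff (a : String) (b : List String) :
    check_ahead_alt a b = true ↔
      ∀ z ∈ [a, pvTrim a], ∀ x ∈ b, z ≠ x ∧ z ≠ pvTrim x := by
  simp only [check_ahead_alt]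
  rw [pvMergeDisjoint_iff _ _ (PySem.List.sorted_ofList_pairwise_lt _)
      (PySem.List.sorted_ofList_pairwise_lt _)]
  simp only [PySem.List.mem_sorted, PySem.Set.mem_ofList, List.mem_flatMap,
    List.mem_cons, List.not_mem_nil, or_false]
  constructor
  · intro h z hz x hx
    refine ⟨fun e => h z hz ?_, fun e => h z hz ?_⟩
    · exact ⟨x, hx, Or.inl e⟩
    · exact ⟨x, hx, Or.inr e⟩
  · intro h z hz
    rintro ⟨x, hx, he⟩
    rcases he with e | e
    · exact (h z hz x hx).1 e
    · exact (h z hz x hx).2 e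

-- ===== VERDICT (by name: the statement is the Claim_ definition above) =====
theorem check_ahead_spec : Claim_equal_check_ahead := by
  intro a b _
  unfold Spec_check_ahead
  rw [Bool.eq_iff_iff, check_ahead_eq_true_iff, check_ahead_alt_eq_true_iff]
  constructor
  · intro h z hz x hx
    obtain ⟨h1, h2, h3⟩ := h x hx
    simp only [List.mem_cons, List.not_mem_nil, or_false] at hz
    rcases hz with rfl | rfl
    · exact ⟨fun e => h3 (e ▸ rfl), fun e => h1 e⟩
    · exact ⟨h2, h3⟩
  · intro h x hx
    have ha := h a (by simp) x hx
    have hf := h (pvTrim a) (by simp) x hx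
    exact ⟨ha.2, hf.1, hf.2⟩
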